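-- pv_equiv track=rewrite | github.com/Dzann/Daspro24G | Function.py | ganti_vokal
-- ===== SOURCE A (Python) =====
-- def ganti_vokal(kalimat, opsi):
--     """
--     Mengganti huruf vokal dengan simbol tertentu berdasarkan opsi.
--
--     Args:
--         kalimat (str): Kalimat yang akan diproses
--         opsi (int): 1 untuk vokal kecil, 2 untuk vokal kapital
--
--     Returns:
--         str: Kalimat dengan vokal yang telah diganti
--     """
--     vokal_kecil = {'a': '4', 'i': '1', 'u': '|_|', 'e': '3', 'o': '0'}
--     vokal_kapital = {'A': '4', 'I': '1', 'U': '|_|', 'E': '3', 'O': '0'}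
--
--     hasil = []
--     for karakter in kalimat:
--         if opsi == 1 and karakter in vokal_kecil:
--             hasil.append(vokal_kecil[karakter])
--         elif opsi == 2 and karakter in vokal_kapital:
--             hasil.append(vokal_kapital[karakter])
--         else:
--             hasil.append(karakter)
--     return ''.join(hasil)
-- ===== SOURCE B (Python) =====
-- def ganti_vokal(kalimat, opsi):
--     if opsi == 1:
--         pairs = [('a', '4'), ('i', '1'), ('u', '|_|'), ('e', '3'), ('o', '0')]
--     elif opsi == 2:
--         pairs = [('A', '4'), ('I', '1'), ('U', '|_|'), ('E', '3'), ('O', '0')]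
--     else:
--         pairs = []
--     for vokal, simbol in pairs:
--         kalimat = kalimat.replace(vokal, simbol)
--     return kalimat
-- ===== Notes on version B (the rewrite author's own statement) =====
-- stated objective: alternative
-- what changed: B replaces A's single per-character loop (per-character opsi tests and dict membership checks) by selecting a (vowel, symbol) pair list from opsi and applying five staged whole-string str.replace passes; this is correct because no replacement text contains a mapped vowel.
import Mathlib
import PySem

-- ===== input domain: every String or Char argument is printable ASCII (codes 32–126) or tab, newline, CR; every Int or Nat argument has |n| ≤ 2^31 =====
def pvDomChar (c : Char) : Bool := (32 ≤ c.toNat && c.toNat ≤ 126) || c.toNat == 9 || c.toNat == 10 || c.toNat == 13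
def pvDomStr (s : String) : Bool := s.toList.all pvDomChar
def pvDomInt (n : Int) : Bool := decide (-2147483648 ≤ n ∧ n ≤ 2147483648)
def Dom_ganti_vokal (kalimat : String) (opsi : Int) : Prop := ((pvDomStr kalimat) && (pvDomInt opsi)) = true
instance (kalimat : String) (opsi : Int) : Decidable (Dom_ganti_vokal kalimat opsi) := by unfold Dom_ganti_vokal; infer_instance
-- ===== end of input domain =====

-- B replaces A's single per-character loop (testing opsi and dict membership on every
-- character) by five staged whole-string str.replace passes over the chosen pair list
-- (alternative decomposition; correct because no replacement text contains a mapped vowel).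

-- ===== PORT A =====
def gvKecilA : PySem.Dict Char String :=
  PySem.Dict.mk [('a', "4"), ('i', "1"), ('u', "|_|"), ('e', "3"), ('o', "0")]
def gvKapitalA : PySem.Dict Char String :=
  PySem.Dict.mk [('A', "4"), ('I', "1"), ('U', "|_|"), ('E', "3"), ('O', "0")]

def ganti_vokal (kalimat : String) (opsi : Int) : String :=
  -- hasil = []; for karakter in kalimat: … ; return ''.join(hasil)
  -- vokal_kecil[karakter] is guarded by 'karakter in vokal_kecil', so getD is exact here
  PySem.Str.join "" (kalimat.toList.foldl (fun hasil karakter =>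
    if opsi = 1 ∧ gvKecilA.contains karakter = true then
      hasil ++ [gvKecilA.getD karakter ""]
    else if opsi = 2 ∧ gvKapitalA.contains karakter = true then
      hasil ++ [gvKapitalA.getD karakter ""]
    else
      hasil ++ [String.ofList [karakter]]) [])

-- ===== PORT B =====
def gvPairs (opsi : Int) : List (String × String) :=
  if opsi = 1 then [("a", "4"), ("i", "1"), ("u", "|_|"), ("e", "3"), ("o", "0")]
  else if opsi = 2 then [("A", "4"), ("I", "1"), ("U", "|_|"), ("E", "3"), ("O", "0")]
  else []

-- for vokal, simbol in pairs: kalimat = kalimat.replace(vokal, simbol); return kalimat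
def ganti_vokal_alt (kalimat : String) (opsi : Int) : String :=
  (gvPairs opsi).foldl (fun kalimat p => PySem.Str.replace kalimat p.1 p.2) kalimat

-- ===== PRECONDITION & SPEC =====
def Spec_ganti_vokal (kalimat : String) (opsi : Int) (out : String) : Prop := out = ganti_vokal_alt kalimat opsi
instance (kalimat : String) (opsi : Int) (out : String) : Decidable (Spec_ganti_vokal kalimat opsi out) := by unfold Spec_ganti_vokal; infer_instance

-- ===== CLAIM (what is proved, stated in full; the proofs are below) =====
def Claim_equal_ganti_vokal : Prop := ∀ (kalimat : String) (opsi : Int), Dom_ganti_vokal kalimat opsi → Spec_ganti_vokal kalimat opsi (ganti_vokal kalimat opsi)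

-- ===== LEMMAS AND PROOFS =====

-- A's per-character step, on character lists
def gvStepA (opsi : Int) (c : Char) : List Char :=
  if opsi = 1 ∧ gvKecilA.contains c = true then (gvKecilA.getD c "").toList
  else if opsi = 2 ∧ gvKapitalA.contains c = true then (gvKapitalA.getD c "").toList
  else [c]

-- B's per-character step for one replace pass
def gvRep (v : Char) (rep : List Char) (c : Char) : List Char :=
  if c = v then rep else [c]

-- join with empty separator is flatten
theorem gv_join_nil (parts : List (List Char)) :
    PySem.Chars.join [] parts = parts.flatten := by
  induction parts with
  | nil => simp [PySem.Chars.join_nil]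
  | cons p ps ih =>
    cases ps with
    | nil => simp [PySem.Chars.join_singleton]
    | cons q qs => simpa [PySem.Chars.join_cons_cons] using ih

-- A is a flatMap of gvStepA over the characters
theorem gv_A_toList (kalimat : String) (opsi : Int) :
    (ganti_vokal kalimat opsi).toList = kalimat.toList.flatMap (gvStepA opsi) := by
  unfold ganti_vokal
  have hfun : (fun (hasil : List String) karakter =>
      if opsi = 1 ∧ gvKecilA.contains karakter = true then hasil ++ [gvKecilA.getD karakter ""]
      else if opsi = 2 ∧ gvKapitalA.contains karakter = true then hasil ++ [gvKapitalA.getD karakter ""]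
      else hasil ++ [String.ofList [karakter]])
      = fun (hasil : List String) karakter => hasil ++ [String.ofList (gvStepA opsi karakter)] := by
    funext hasil karakter
    unfold gvStepA
    split_ifs <;> simp [String.ofList_toList]
  rw [hfun, PySem.List.foldl_append_singleton_eq_map, List.nil_append, PySem.Str.toList_join]
  simp only [List.map_map, Function.comp_def, String.toList_ofList]
  rw [show "".toList = ([] : List Char) from rfl, gv_join_nil, ← List.flatMap_def]

-- replace with a one-character pattern is a per-character flatMap
theorem gv_replace_go_single (c : Char) (rep : List Char) :
    ∀ (l acc : List Char) (fuel : Nat), l.length ≤ fuel →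
      PySem.Chars.replace.go [c] rep fuel l acc
        = acc.reverse ++ l.flatMap (gvRep c rep) := by
  intro l
  induction l with
  | nil =>
    intro acc fuel _
    cases fuel <;> simp [PySem.Chars.replace.go]
  | cons c' t ih =>
    intro acc fuel hlen
    cases fuel with
    | zero => simp at hlen
    | succ fuel =>
      have hlen' : t.length ≤ fuel := by simpa using hlen
      by_cases h : c' = c
      · subst h
        have hp : [c'].isPrefixOf (c' :: t) = true := by simp [List.isPrefixOf]
        simp only [PySem.Chars.replace.go, hp, if_pos rfl]
        rw [show List.drop [c'].length (c' :: t) = t from rfl, ih (rep.reverse ++ acc) fuel hlen']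
        simp [gvRep]
      · have hp : [c].isPrefixOf (c' :: t) = false := by
          simp [List.isPrefixOf]
          exact fun hc => (h hc.symm).elim
        simp only [PySem.Chars.replace.go, hp, Bool.false_eq_true, if_false]
        rw [ih (c' :: acc) fuel hlen']
        simp [gvRep, h]

theorem gv_replace_single (s : List Char) (c : Char) (rep : List Char) :
    PySem.Chars.replace s [c] rep = s.flatMap (gvRep c rep) := by
  unfold PySem.Chars.replace
  rw [if_neg (by simp)]
  simpa using gv_replace_go_single c rep s [] s.length le_rfl

-- one replace pass, on strings
theorem gv_replace_pass (s : String) (v : Char) (rep : String) :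
    (PySem.Str.replace s (String.ofList [v]) rep).toList
      = s.toList.flatMap (gvRep v rep.toList) := by
  have := PySem.Str.toList_replace s (String.ofList [v]) rep
  rw [this, String.toList_ofList, gv_replace_single]

-- the composed five-pass step equals A's one-pass step, opsi = 1
theorem gv_comp_kecil (c : Char) :
    (gvRep 'a' "4".toList c).flatMap (fun x =>
      (gvRep 'i' "1".toList x).flatMap (fun x =>
        (gvRep 'u' "|_|".toList x).flatMap (fun x =>
          (gvRep 'e' "3".toList x).flatMap (gvRep 'o' "0".toList))))
      = gvStepA 1 c := by
  by_cases ha : c = 'a'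
  · subst ha; decide
  by_cases hi : c = 'i'
  · subst hi; decide
  by_cases hu : c = 'u'
  · subst hu; decide
  by_cases he : c = 'e'
  · subst he; decide
  by_cases ho : c = 'o'
  · subst ho; decide
  · simp [gvRep, ha, hi, hu, he, ho, gvStepA, gvKecilA, PySem.Dict.contains, PySem.Dict.get?,
      Ne.symm ha, Ne.symm hi, Ne.symm hu, Ne.symm he, Ne.symm ho]

-- the composed five-pass step equals A's one-pass step, opsi = 2
theorem gv_comp_kapital (c : Char) :
    (gvRep 'A' "4".toList c).flatMap (fun x =>
      (gvRep 'I' "1".toList x).flatMap (fun x =>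
        (gvRep 'U' "|_|".toList x).flatMap (fun x =>
          (gvRep 'E' "3".toList x).flatMap (gvRep 'O' "0".toList))))
      = gvStepA 2 c := by
  by_cases ha : c = 'A'
  · subst ha; decide
  by_cases hi : c = 'I'
  · subst hi; decide
  by_cases hu : c = 'U'
  · subst hu; decide
  by_cases he : c = 'E'
  · subst he; decide
  by_cases ho : c = 'O'
  · subst ho; decide
  · simp [gvRep, ha, hi, hu, he, ho, gvStepA, gvKapitalA, PySem.Dict.contains, PySem.Dict.get?,
      Ne.symm ha, Ne.symm hi, Ne.symm hu, Ne.symm he, Ne.symm ho]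

-- ===== VERDICT (by name: the statement is the Claim_ definition above) =====
theorem ganti_vokal_spec : Claim_equal_ganti_vokal := by
  intro kalimat opsi _
  unfold Spec_ganti_vokal
  apply String.toList_inj.mp
  rw [gv_A_toList]
  unfold ganti_vokal_alt gvPairs
  by_cases h1 : opsi = 1
  · subst h1
    rw [if_pos rfl]
    simp only [List.foldl_cons, List.foldl_nil]
    rw [show ("a" : String) = String.ofList ['a'] from rfl,
        show ("i" : String) = String.ofList ['i'] from rfl,
        show ("u" : String) = String.ofList ['u'] from rfl,
        show ("e" : String) = String.ofList ['e'] from rfl,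
        show ("o" : String) = String.ofList ['o'] from rfl]
    rw [gv_replace_pass, gv_replace_pass, gv_replace_pass, gv_replace_pass, gv_replace_pass]
    rw [List.flatMap_assoc, List.flatMap_assoc, List.flatMap_assoc, List.flatMap_assoc]
    exact (List.flatMap_congr (by intro c _; rw [gv_comp_kecil])).symm
  · by_cases h2 : opsi = 2
    · subst h2
      rw [if_neg (by decide), if_pos rfl]
      simp only [List.foldl_cons, List.foldl_nil]
      rw [show ("A" : String) = String.ofList ['A'] from rfl,
          show ("I" : String) = String.ofList ['I'] from rfl,
          show ("U" : String) = String.ofList ['U'] from rfl,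
          show ("E" : String) = String.ofList ['E'] from rfl,
          show ("O" : String) = String.ofList ['O'] from rfl]
      rw [gv_replace_pass, gv_replace_pass, gv_replace_pass, gv_replace_pass, gv_replace_pass]
      rw [List.flatMap_assoc, List.flatMap_assoc, List.flatMap_assoc, List.flatMap_assoc]
      exact (List.flatMap_congr (by intro c _; rw [gv_comp_kapital])).symm
    · rw [if_neg h1, if_neg h2]
      simp only [List.foldl_nil]
      have : gvStepA opsi = fun c => [c] := by
        funext c
        unfold gvStepA
        rw [if_neg (by simp [h1]), if_neg (by simp [h2])]
      rw [this]
      simp
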